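-- pv_equiv track=rewrite | github.com/Brendan3000/Huy | products.py | negative_expander
-- ===== SOURCE A (Python) =====
-- def brackets_remover(box_variable):
--     if len(box_variable) - 1 == next_closed_bracket(box_variable) and box_variable.find("(") == 0:
--         return box_variable[1:len(box_variable)-1]
--     else:
--         return box_variable
--
-- def next_closed_bracket(box_v):
--     counter_a = 0
--     i = 0
--     for letter in box_v:
--         if letter == "(":
--             counter_a += 1
--         if letter == ")":
--             counter_a -= 1
--             if counter_a == 0:
--                 break
--         i += 1
--     return i
--
-- def is_closed_in(box_v):
--     counter_a = 0
--     # counter_a being equal to zero AFTER the for loop ensures each open bracket has a respective close bracket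
--     for letter in box_v:
--         if letter =="(":
--             counter_a += 1
--         if letter == ")":
--             counter_a -= 1
--     if counter_a == 0:
--         return False
--     else:
--         return True
--
-- def negative_expander(box_v):
--     box_v = brackets_remover(box_v)
--     index = 0
--     changed = False
--     # for +/- on the indside, the switch sign
--     for letter in box_v:
--         if letter == "-" and not is_closed_in(box_v[index:]):
--             box_v= box_v[:index] + "+" + box_v[index+1:]
--             changed = True
--         if letter == "+" and not is_closed_in(box_v[index:]):
--             box_v = box_v[:index] + "-" + box_v[index+1:]
--             changed = True
--         index += 1
--     return box_v, changed
-- ===== SOURCE B (Python) =====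
-- def negative_expander(box_v):
--     s = box_v
--     # total bracket balance, one pass
--     total = 0
--     for c in s:
--         if c == "(":
--             total += 1
--         elif c == ")":
--             total -= 1
--     # strip one enclosing bracket pair: s = "(" + inner + ")" with the
--     # first '(' matched exactly by the final character
--     if s[:1] == "(" and total == 0:
--         b = 0
--         ok = True
--         for c in s[:len(s) - 1]:
--             if c == "(":
--                 b += 1
--             elif c == ")":
--                 b -= 1
--             if b <= 0:
--                 ok = False
--                 break
--         if ok:
--             s = s[1:len(s) - 1]
--     # single pass: flip a sign exactly when the remaining suffix has
--     # bracket balance 0, i.e. the prefix balance equals total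
--     out = []
--     changed = False
--     b = 0
--     for c in s:
--         if b == total and (c == "-" or c == "+"):
--             out.append("+" if c == "-" else "-")
--             changed = True
--         else:
--             out.append(c)
--         if c == "(":
--             b += 1
--         elif c == ")":
--             b -= 1
--     return "".join(out), changed
-- ===== Notes on version B (the rewrite author's own statement) =====
-- stated objective: alternative
-- what changed: B replaces A's per-index calls to is_closed_in (a rescan of each remaining suffix) and repeated string-slicing rebuilds by one precomputed total bracket balance plus a single left-to-right pass that flips a sign exactly when the running prefix balance equals the total, and replaces brackets_remover's first-matching-bracket scan by an equivalent running-balance check.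
import Mathlib
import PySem

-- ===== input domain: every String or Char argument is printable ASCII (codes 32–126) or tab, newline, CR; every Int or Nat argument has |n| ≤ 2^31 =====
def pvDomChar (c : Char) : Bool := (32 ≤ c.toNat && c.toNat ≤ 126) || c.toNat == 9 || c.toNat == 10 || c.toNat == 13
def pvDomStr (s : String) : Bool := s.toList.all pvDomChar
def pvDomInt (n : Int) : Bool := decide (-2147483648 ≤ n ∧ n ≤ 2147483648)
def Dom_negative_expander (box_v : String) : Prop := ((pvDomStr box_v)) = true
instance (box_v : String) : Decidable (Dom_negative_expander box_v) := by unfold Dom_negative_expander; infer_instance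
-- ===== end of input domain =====

-- B replaces A's per-index suffix re-scans and slice rebuilds by one precomputed total
-- bracket balance and a single running-balance pass (objective: alternative).


-- ===== PORT A =====
-- strings are handled as their code-point lists (PySem.Chars level); slices are PySem.List.slice

-- next_closed_bracket's for-loop (with its break)
def pvNcbLoop : List Char → Int → Int → Int
  | [], _, i => i
  | c :: rest, counter_a, i =>
    let counter_a := if c = '(' then counter_a + 1 else counter_a
    if c = ')' then
      (if counter_a - 1 = 0 then i else pvNcbLoop rest (counter_a - 1) (i + 1))
    else pvNcbLoop rest counter_a (i + 1)

def pvNextClosedBracket (box_v : List Char) : Int := pvNcbLoop box_v 0 0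

-- is_closed_in's counting loop
def pvIcLoop : List Char → Int → Int
  | [], counter_a => counter_a
  | c :: rest, counter_a =>
    let counter_a := if c = '(' then counter_a + 1 else counter_a
    let counter_a := if c = ')' then counter_a - 1 else counter_a
    pvIcLoop rest counter_a

def pvIsClosedIn (box_v : List Char) : Bool :=
  if pvIcLoop box_v 0 = 0 then false else true

def pvBracketsRemover (box_variable : List Char) : List Char :=
  if (box_variable.length : Int) - 1 = pvNextClosedBracket box_variable ∧
     PySem.Chars.find box_variable ['('] = 0 then
    PySem.List.slice box_variable (some 1) (some ((box_variable.length : Int) - 1))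
  else
    box_variable

-- negative_expander's for-loop: `letters` is the iterator's snapshot of box_v,
-- `cur` the (reassigned) box_v string
def pvNegLoop : List Char → List Char → Int → Bool → List Char × Bool
  | [], cur, _, changed => (cur, changed)
  | letter :: rest, cur, index, changed =>
    let st :=
      if letter = '-' ∧ pvIsClosedIn (PySem.List.slice cur (some index) none) = false then
        (PySem.List.slice cur none (some index) ++ ['+'] ++
           PySem.List.slice cur (some (index + 1)) none, true)
      else (cur, changed)
    let st :=
      if letter = '+' ∧ pvIsClosedIn (PySem.List.slice st.1 (some index) none) = false then
        (PySem.List.slice st.1 none (some index) ++ ['-'] ++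
           PySem.List.slice st.1 (some (index + 1)) none, true)
      else st
    pvNegLoop rest st.1 (index + 1) st.2

def negative_expander (box_v : String) : String × Bool :=
  let bv := pvBracketsRemover box_v.toList
  let r := pvNegLoop bv bv 0 false
  (String.ofList r.1, r.2)

-- ===== PORT B =====
-- total/running bracket-balance loop of Source B (`total = 0; for c in s: …`)
def altBalLoop : List Char → Int → Int
  | [], t => t
  | c :: rest, t => altBalLoop rest (if c = '(' then t + 1 else if c = ')' then t - 1 else t)

-- the ok-loop of Source B (breaks as soon as b <= 0)
def altOk : List Char → Int → Bool
  | [], _ => true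
  | c :: rest, b =>
    let b := if c = '(' then b + 1 else if c = ')' then b - 1 else b
    if b ≤ 0 then false else altOk rest b

-- the single flipping pass of Source B (out list built by the structural recursion)
def altFlip : List Char → Int → Int → List Char × Bool
  | [], _, _ => ([], false)
  | c :: rest, total, b =>
    let r := altFlip rest total (if c = '(' then b + 1 else if c = ')' then b - 1 else b)
    if b = total ∧ (c = '-' ∨ c = '+') then
      ((if c = '-' then '+' else '-') :: r.1, true)
    else (c :: r.1, r.2)

def negative_expander_alt (box_v : String) : String × Bool :=
  let s0 := box_v.toList
  let total := altBalLoop s0 0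
  let s :=
    if PySem.List.slice s0 none (some 1) = ['('] ∧ total = 0 then
      (if altOk (PySem.List.slice s0 none (some ((s0.length : Int) - 1))) 0 then
         PySem.List.slice s0 (some 1) (some ((s0.length : Int) - 1))
       else s0)
    else s0
  let r := altFlip s total 0
  (String.ofList r.1, r.2)

-- ===== PRECONDITION & SPEC =====
def Spec_negative_expander (box_v : String) (out : String × Bool) : Prop := out = negative_expander_alt box_v
instance (box_v : String) (out : String × Bool) : Decidable (Spec_negative_expander box_v out) := by unfold Spec_negative_expander; infer_instance

-- ===== CLAIM (what is proved, stated in full; the proofs are below) =====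
def Claim_equal_negative_expander : Prop := ∀ (box_v : String), Dom_negative_expander box_v → Spec_negative_expander box_v (negative_expander box_v)

-- ===== LEMMAS AND PROOFS =====

def pvDelta (c : Char) : Int := if c = '(' then 1 else if c = ')' then -1 else 0

def pvBal (l : List Char) : Int := (l.map pvDelta).sum

theorem pvBal_nil : pvBal [] = 0 := rfl

theorem pvBal_cons (c : Char) (l : List Char) : pvBal (c :: l) = pvDelta c + pvBal l := by
  simp [pvBal]

theorem pvBal_append (l m : List Char) : pvBal (l ++ m) = pvBal l + pvBal m := by
  simp [pvBal]

theorem altBalLoop_eq (l : List Char) : ∀ t, altBalLoop l t = t + pvBal l := by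
  induction l with
  | nil => simp [altBalLoop, pvBal]
  | cons c rest ih =>
    intro t
    simp only [altBalLoop, ih, pvBal_cons, pvDelta]
    split_ifs <;> omega

theorem pvIcLoop_eq (l : List Char) : ∀ t, pvIcLoop l t = t + pvBal l := by
  induction l with
  | nil => simp [pvIcLoop, pvBal]
  | cons c rest ih =>
    intro t
    simp only [pvIcLoop, ih, pvBal_cons, pvDelta]
    split_ifs with h1 h2 h3 <;>
      first
        | omega
        | exact absurd (h1.symm.trans h2) (by decide)

theorem pvIsClosedIn_eq_false_iff (l : List Char) : pvIsClosedIn l = false ↔ pvBal l = 0 := by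
  simp [pvIsClosedIn, pvIcLoop_eq]

-- altOk true means every running balance stayed ≥ 1 (in particular the final one)
theorem altOk_final (l : List Char) : ∀ b, 1 ≤ b → altOk l b = true → 1 ≤ b + pvBal l := by
  induction l with
  | nil => intro b hb _; simpa [pvBal]
  | cons c rest ih =>
    intro b hb h
    simp only [altOk] at h
    rw [pvBal_cons]
    simp only [pvDelta]
    split_ifs at h ⊢ <;>
      first
        | simp at h
        | (have := ih _ (by omega) h; omega)

-- the key combinatorial fact: A's next_closed_bracket loop reaches exactly the last
-- index iff B's ok-loop succeeds on the dropLast and the total balance closes to 0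
theorem pvNcb_comb (l : List Char) : ∀ (ctr i : Int), 0 < ctr →
    (pvNcbLoop l ctr i = i + (l.length : Int) - 1 ↔
      (l ≠ [] ∧ altOk l.dropLast ctr = true ∧ ctr + pvBal l = 0)) := by
  induction l with
  | nil =>
    intro ctr i h
    simp only [pvNcbLoop, List.length_nil, Nat.cast_zero, ne_eq, not_true_eq_false,
      false_and, iff_false]
    omega
  | cons c rest ih =>
    intro ctr i h
    have hlen : i + ((c :: rest).length : Int) - 1 = (i + 1) + (rest.length : Int) - 1 := by
      push_cast [List.length_cons]; ring
    rw [hlen]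
    by_cases hq : c = ')'
    · subst hq
      simp only [pvNcbLoop, Char.reduceEq, reduceIte]
      by_cases h1 : ctr - 1 = 0
      · rw [if_pos h1]
        cases rest with
        | nil =>
          simp only [List.dropLast_singleton, altOk, pvBal_cons, pvBal_nil, pvDelta,
            Char.reduceEq, reduceIte, List.length_nil, Nat.cast_zero,
            ne_eq, reduceCtorEq, not_false_eq_true, true_and]
          push_cast
          omega
        | cons r rs =>
          rw [List.dropLast_cons₂]
          simp only [altOk, Char.reduceEq, reduceIte,
            if_pos (by omega : ctr - 1 ≤ 0), List.length_cons, ne_eq, reduceCtorEq,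
            not_false_eq_true, true_and, Bool.false_eq_true, false_and, iff_false]
          push_cast; omega
      · rw [if_neg h1, ih (ctr - 1) (i + 1) (by omega)]
        cases rest with
        | nil =>
          simp only [List.dropLast_singleton, altOk, pvBal_cons, pvBal_nil, pvDelta,
            Char.reduceEq, reduceIte, ne_eq, not_true_eq_false,
            false_and, false_iff, reduceCtorEq, not_false_eq_true, true_and]
          push_cast
          omega
        | cons r rs =>
          rw [List.dropLast_cons₂]
          rw [show pvBal (')' :: r :: rs) = pvBal (r :: rs) - 1 from by
            rw [pvBal_cons]; simp [pvDelta]; ring]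
          simp only [altOk, Char.reduceEq, reduceIte, if_neg (by omega : ¬ ctr - 1 ≤ 0),
            ne_eq, reduceCtorEq, not_false_eq_true, true_and]
          constructor
          · rintro ⟨hok, hb⟩; exact ⟨hok, by omega⟩
          · rintro ⟨hok, hb⟩; exact ⟨hok, by omega⟩
    · by_cases hp : c = '('
      · subst hp
        simp only [pvNcbLoop, Char.reduceEq, reduceIte]
        rw [ih (ctr + 1) (i + 1) (by omega)]
        cases rest with
        | nil =>
          simp only [List.dropLast_singleton, altOk, pvBal_cons, pvBal_nil, pvDelta, Char.reduceEq, reduceIte, ne_eq, not_true_eq_false, false_and, false_iff,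
            reduceCtorEq, not_false_eq_true, true_and]
          push_cast
          omega
        | cons r rs =>
          rw [List.dropLast_cons₂]
          rw [show pvBal ('(' :: r :: rs) = pvBal (r :: rs) + 1 from by
            rw [pvBal_cons]; simp [pvDelta]; ring]
          simp only [altOk, Char.reduceEq, reduceIte, if_neg (by omega : ¬ ctr + 1 ≤ 0),
            ne_eq, reduceCtorEq, not_false_eq_true, true_and]
          constructor
          · rintro ⟨hok, hb⟩; exact ⟨hok, by omega⟩
          · rintro ⟨hok, hb⟩; exact ⟨hok, by omega⟩
      · simp only [pvNcbLoop, if_neg hp, if_neg hq]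
        rw [ih ctr (i + 1) h]
        cases rest with
        | nil =>
          simp only [List.dropLast_singleton, altOk, pvBal_cons, pvBal_nil, pvDelta,
            if_neg hp, if_neg hq, ne_eq, not_true_eq_false, false_and, false_iff,
            reduceCtorEq, not_false_eq_true, true_and]
          push_cast
          omega
        | cons r rs =>
          rw [List.dropLast_cons₂]
          rw [show pvBal (c :: r :: rs) = pvBal (r :: rs) from by
            rw [pvBal_cons]; simp [pvDelta, hp, hq]]
          simp only [altOk, if_neg hp, if_neg hq, if_neg (by omega : ¬ ctr ≤ 0),
            ne_eq, reduceCtorEq, not_false_eq_true, true_and]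

theorem main_loop (l : List Char) : ∀ (pre : List Char) (ch : Bool) (t : Int),
    t = pvBal pre + pvBal l →
    pvNegLoop l (pre ++ l) (pre.length : Int) ch =
      (pre ++ (altFlip l t (pvBal pre)).1, ch || (altFlip l t (pvBal pre)).2) := by
  induction l with
  | nil => intro pre ch t ht; simp [pvNegLoop, altFlip]
  | cons c rest ih =>
    intro pre ch t ht
    rw [pvBal_cons] at ht
    have hdrop : PySem.List.slice (pre ++ c :: rest) (some ((pre.length : Nat) : Int)) none
        = c :: rest := by
      rw [PySem.List.slice_from_natCast, List.drop_left]
    have htake : PySem.List.slice (pre ++ c :: rest) none (some ((pre.length : Nat) : Int))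
        = pre := by
      rw [PySem.List.slice_to_natCast, List.take_left]
    have hdrop1 : PySem.List.slice (pre ++ c :: rest) (some ((pre.length : Int) + 1)) none
        = rest := by
      have hcast : ((pre.length : Int) + 1) = (((pre ++ [c]).length : Nat) : Int) := by
        push_cast [List.length_append, List.length_cons, List.length_nil]; ring
      rw [hcast, show pre ++ c :: rest = (pre ++ [c]) ++ rest by simp,
        PySem.List.slice_from_natCast, List.drop_left]
    have hic := pvIsClosedIn_eq_false_iff (c :: rest)
    by_cases hm : c = '-'
    · subst hm
      simp only [pvDelta, Char.reduceEq, reduceIte] at ht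
      by_cases hbal : pvBal ('-' :: rest) = 0
      · have hbal' := hbal
        rw [pvBal_cons] at hbal'
        simp only [pvDelta, Char.reduceEq, reduceIte] at hbal'
        have hpre : pvBal pre = t := by omega
        simp only [pvNegLoop, hdrop, Char.reduceEq, true_and, false_and, if_false,
          hic.mpr hbal, if_true]
        rw [htake, hdrop1,
          show pre ++ ['+'] ++ rest = (pre ++ ['+']) ++ rest by simp,
          show ((pre.length : Int) + 1) = (((pre ++ ['+']).length : Nat) : Int) by
            push_cast [List.length_append, List.length_cons, List.length_nil]; ring]
        rw [ih (pre ++ ['+']) true t (by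
          rw [pvBal_append, pvBal_cons, pvBal_nil]
          simp only [pvDelta, Char.reduceEq, reduceIte]
          omega)]
        have hpb : pvBal (pre ++ ['+']) = pvBal pre := by
          simp [pvBal_append, pvBal_cons, pvBal_nil, pvDelta]
        rw [hpb]
        simp only [altFlip, Char.reduceEq, reduceIte, or_false, and_true]
        rw [if_pos hpre]
        simp
      · have hbal' := hbal
        rw [pvBal_cons] at hbal'
        simp only [pvDelta, Char.reduceEq, reduceIte] at hbal'
        have hpre : ¬ (pvBal pre = t) := by omega
        simp only [pvNegLoop, hdrop, Char.reduceEq, true_and, false_and, if_false]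
        rw [if_neg (by rw [hic]; exact hbal)]
        rw [show pre ++ '-' :: rest = (pre ++ ['-']) ++ rest by simp,
          show ((pre.length : Int) + 1) = (((pre ++ ['-']).length : Nat) : Int) by
            push_cast [List.length_append, List.length_cons, List.length_nil]; ring]
        rw [ih (pre ++ ['-']) ch t (by
          rw [pvBal_append, pvBal_cons, pvBal_nil]
          simp only [pvDelta, Char.reduceEq, reduceIte]
          omega)]
        have hpb : pvBal (pre ++ ['-']) = pvBal pre := by
          simp [pvBal_append, pvBal_cons, pvBal_nil, pvDelta]
        rw [hpb]
        simp only [altFlip, if_neg (fun hh : _ ∧ _ => hpre hh.1)]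
        simp
    · by_cases hp2 : c = '+'
      · subst hp2
        simp only [pvDelta, Char.reduceEq, reduceIte] at ht
        by_cases hbal : pvBal ('+' :: rest) = 0
        · have hbal' := hbal
          rw [pvBal_cons] at hbal'
          simp only [pvDelta, Char.reduceEq, reduceIte] at hbal'
          have hpre : pvBal pre = t := by omega
          simp only [pvNegLoop, hdrop, Char.reduceEq, true_and, false_and, if_false,
            hic.mpr hbal, if_true]
          rw [htake, hdrop1,
            show pre ++ ['-'] ++ rest = (pre ++ ['-']) ++ rest by simp,
            show ((pre.length : Int) + 1) = (((pre ++ ['-']).length : Nat) : Int) by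
              push_cast [List.length_append, List.length_cons, List.length_nil]; ring]
          rw [ih (pre ++ ['-']) true t (by
            rw [pvBal_append, pvBal_cons, pvBal_nil]
            simp only [pvDelta, Char.reduceEq, reduceIte]
            omega)]
          have hpb : pvBal (pre ++ ['-']) = pvBal pre := by
            simp [pvBal_append, pvBal_cons, pvBal_nil, pvDelta]
          rw [hpb]
          simp only [altFlip, Char.reduceEq, reduceIte, false_or, and_true]
          rw [if_pos hpre]
          simp
        · have hbal' := hbal
          rw [pvBal_cons] at hbal'
          simp only [pvDelta, Char.reduceEq, reduceIte] at hbal'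
          have hpre : ¬ (pvBal pre = t) := by omega
          simp only [pvNegLoop, hdrop, Char.reduceEq, true_and, false_and, if_false]
          rw [if_neg (by rw [hic]; exact hbal)]
          rw [show pre ++ '+' :: rest = (pre ++ ['+']) ++ rest by simp,
            show ((pre.length : Int) + 1) = (((pre ++ ['+']).length : Nat) : Int) by
              push_cast [List.length_append, List.length_cons, List.length_nil]; ring]
          rw [ih (pre ++ ['+']) ch t (by
            rw [pvBal_append, pvBal_cons, pvBal_nil]
            simp only [pvDelta, Char.reduceEq, reduceIte]
            omega)]
          have hpb : pvBal (pre ++ ['+']) = pvBal pre := by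
            simp [pvBal_append, pvBal_cons, pvBal_nil, pvDelta]
          rw [hpb]
          simp only [altFlip, if_neg (fun hh : _ ∧ _ => hpre hh.1)]
          simp
      · simp only [pvNegLoop, if_neg (fun hh : _ ∧ _ => hm hh.1),
          if_neg (fun hh : _ ∧ _ => hp2 hh.1)]
        rw [show pre ++ c :: rest = (pre ++ [c]) ++ rest by simp,
          show ((pre.length : Int) + 1) = (((pre ++ [c]).length : Nat) : Int) by
            push_cast [List.length_append, List.length_cons, List.length_nil]; ring]
        rw [ih (pre ++ [c]) ch t (by
          rw [pvBal_append, pvBal_cons, pvBal_nil]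
          omega)]
        have hpb : pvBal (pre ++ [c]) = pvBal pre + pvDelta c := by
          rw [pvBal_append, pvBal_cons, pvBal_nil]; ring
        rw [hpb]
        simp only [altFlip]
        rw [if_neg (show ¬ (pvBal pre = t ∧ (c = '-' ∨ c = '+')) from
          fun hh => hh.2.elim (fun h2 => hm h2) (fun h2 => hp2 h2))]
        rw [show (if c = '(' then pvBal pre + 1 else if c = ')' then pvBal pre - 1
            else pvBal pre) = pvBal pre + pvDelta c from by
          simp only [pvDelta]; split_ifs <;> ring]
        simp

theorem pvDelta_bounds (c : Char) : -1 ≤ pvDelta c ∧ pvDelta c ≤ 1 := by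
  simp only [pvDelta]; split_ifs <;> omega

theorem find_lparen_cons (c : Char) (rest : List Char) :
    PySem.Chars.find (c :: rest) ['('] = 0 ↔ c = '(' := by
  constructor
  · intro h
    have h0 : 0 ≤ PySem.Chars.find (c :: rest) ['('] := le_of_eq h.symm
    obtain ⟨hp, -⟩ := PySem.Chars.find_spec h0
    rw [h] at hp
    simp only [Int.toNat_zero, List.drop_zero] at hp
    obtain ⟨t, ht⟩ := hp
    simp only [List.cons_append, List.nil_append, List.cons.injEq] at ht
    exact ht.1.symm
  · intro h
    subst h
    have hpre : ['('] <+: ('(' :: rest) := ⟨rest, rfl⟩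
    have hnn : 0 ≤ PySem.Chars.find ('(' :: rest) ['('] :=
      (PySem.Chars.find_nonneg_iff _ _).mpr hpre.isInfix
    obtain ⟨-, hmin⟩ := PySem.Chars.find_spec hnn
    have hz : (PySem.Chars.find ('(' :: rest) ['(']).toNat = 0 := by
      by_contra hne
      exact hmin 0 (by omega) (by simp only [List.drop_zero]; exact hpre)
    omega

theorem slice_take1 (c : Char) (rest : List Char) :
    PySem.List.slice (c :: rest) none (some 1) = [c] := by
  rw [PySem.List.slice_to _ (by norm_num)]
  simp

theorem slice_inner (c : Char) (rest : List Char) :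
    PySem.List.slice (c :: rest) (some 1) (some (((c :: rest).length : Int) - 1))
      = rest.dropLast := by
  rw [PySem.List.slice_toNat _ (by norm_num) (by push_cast [List.length_cons]; omega)]
  have h1 : ((1 : Int)).toNat = 1 := rfl
  have h2 : (((c :: rest).length : Int) - 1).toNat = rest.length := by
    push_cast [List.length_cons]; omega
  rw [h1, h2]
  simp [List.dropLast_eq_take]

theorem slice_to_pred (c : Char) (rest : List Char) :
    PySem.List.slice (c :: rest) none (some (((c :: rest).length : Int) - 1))
      = (c :: rest).dropLast := by
  rw [show (((c :: rest).length : Int) - 1) = (((c :: rest).length - 1 : Nat) : Int) by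
      push_cast [List.length_cons]; omega,
    PySem.List.slice_to_natCast, List.dropLast_eq_take]

theorem altOk_lparen (x : List Char) : altOk ('(' :: x) 0 = altOk x 1 := by
  simp [altOk]

-- A's brackets_remover equals B's strip step
theorem strip_alt (l : List Char) :
    pvBracketsRemover l =
      (if PySem.List.slice l none (some 1) = ['('] ∧ altBalLoop l 0 = 0 then
        (if altOk (PySem.List.slice l none (some ((l.length : Int) - 1))) 0 then
           PySem.List.slice l (some 1) (some ((l.length : Int) - 1))
         else l)
       else l) := by
  cases l with
  | nil => decide
  | cons c rest =>
    by_cases hc : c = '('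
    · subst hc
      cases rest with
      | nil => decide
      | cons r rs =>
        rw [slice_take1, slice_to_pred, List.dropLast_cons₂, altOk_lparen]
        have hbalrw : altBalLoop ('(' :: r :: rs) 0 = 1 + pvBal (r :: rs) := by
          rw [altBalLoop_eq, pvBal_cons]
          simp [pvDelta]
        have hncb : pvNextClosedBracket ('(' :: r :: rs) = pvNcbLoop (r :: rs) 1 1 := by
          simp [pvNextClosedBracket, pvNcbLoop]
        have hAiff : ((('(' :: r :: rs).length : Int) - 1 = pvNextClosedBracket ('(' :: r :: rs) ∧
              PySem.Chars.find ('(' :: r :: rs) ['('] = 0) ↔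
            (altOk (r :: rs).dropLast 1 = true ∧ 1 + pvBal (r :: rs) = 0) := by
          rw [hncb, and_iff_left ((find_lparen_cons _ _).mpr rfl), eq_comm,
            show ((('(' :: r :: rs).length : Int) - 1) = 1 + ((r :: rs).length : Int) - 1 by
              push_cast [List.length_cons]; ring,
            pvNcb_comb (r :: rs) 1 1 one_pos]
          constructor
          · rintro ⟨-, hok, hb⟩; exact ⟨hok, hb⟩
          · rintro ⟨hok, hb⟩; exact ⟨by simp, hok, hb⟩
        rw [pvBracketsRemover]
        by_cases hb0 : 1 + pvBal (r :: rs) = 0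
        · by_cases hok : altOk (r :: rs).dropLast 1 = true
          · rw [if_pos (hAiff.mpr ⟨hok, hb0⟩), if_pos ⟨rfl, by rw [hbalrw]; exact hb0⟩,
              if_pos hok]
          · rw [if_neg (fun hA => hok (hAiff.mp hA).1), if_pos ⟨rfl, by rw [hbalrw]; exact hb0⟩,
              if_neg hok]
        · rw [if_neg (fun hA => hb0 (hAiff.mp hA).2),
            if_neg (fun hB => hb0 (by rw [← hbalrw]; exact hB.2))]
    · rw [pvBracketsRemover, slice_take1,
        if_neg (fun hA => hc ((find_lparen_cons _ _).mp hA.2)),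
        if_neg (fun hB => hc (by
          have := hB.1
          simp only [List.cons.injEq] at this
          exact this.1))]

-- stripping the bracket pair does not change the bracket balance
theorem strip_bal (l : List Char) : pvBal (pvBracketsRemover l) = pvBal l := by
  rw [strip_alt]
  cases l with
  | nil => decide
  | cons c rest =>
    rw [slice_take1]
    by_cases hc : c = '('
    · subst hc
      cases rest with
      | nil => decide
      | cons r rs =>
        rw [slice_to_pred, List.dropLast_cons₂, altOk_lparen, slice_inner]
        by_cases hb0 : altBalLoop ('(' :: r :: rs) 0 = 0
        · have hbal : 1 + pvBal (r :: rs) = 0 := by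
            rw [altBalLoop_eq, pvBal_cons] at hb0
            simp [pvDelta] at hb0
            omega
          by_cases hok : altOk (r :: rs).dropLast 1 = true
          · rw [if_pos ⟨rfl, hb0⟩, if_pos hok]
            have hge := altOk_final (r :: rs).dropLast 1 le_rfl hok
            have hne : (r :: rs) ≠ [] := by simp
            have hsplit : (r :: rs).dropLast ++ [(r :: rs).getLast hne] = r :: rs :=
              List.dropLast_append_getLast hne
            have hbsplit : pvBal ((r :: rs).dropLast) +
                pvDelta ((r :: rs).getLast hne) = pvBal (r :: rs) := by
              conv_rhs => rw [← hsplit]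
              rw [pvBal_append, pvBal_cons, pvBal_nil]
              ring
            have hdb := pvDelta_bounds ((r :: rs).getLast hne)
            have hgoal : pvBal ((r :: rs).dropLast) = 0 := by omega
            rw [hgoal, pvBal_cons]
            simp only [pvDelta, Char.reduceEq, reduceIte]
            omega
          · rw [if_pos ⟨rfl, hb0⟩, if_neg hok]
        · rw [if_neg (fun hB => hb0 hB.2)]
    · rw [if_neg (fun hB => hc (by
        have := hB.1
        simp only [List.cons.injEq] at this
        exact this.1))]

-- ===== VERDICT (by name: the statement is the Claim_ definition above) =====
theorem negative_expander_spec : Claim_equal_negative_expander := by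
  intro s _
  show negative_expander s = negative_expander_alt s
  rw [negative_expander, negative_expander_alt]
  have hmain := main_loop (pvBracketsRemover s.toList) [] false
    (pvBal (pvBracketsRemover s.toList)) (by rw [pvBal_nil]; ring)
  simp only [List.nil_append, List.length_nil, Nat.cast_zero, pvBal_nil,
    Bool.false_or] at hmain
  rw [hmain, strip_bal, strip_alt, altBalLoop_eq]
  rw [show (0 : Int) + pvBal s.toList = pvBal s.toList by ring]
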